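-- pv_equiv track=rewrite | github.com/BenAladjem/Tasks | batery_simulator/battery_life_calculator.py | calculate_iter_energy
-- ===== SOURCE A (Python) =====
-- def calculate_iter_energy(typ, rep, slp, wrk):
--     energy = 0
--     for ch in typ:
--
--         if ch == 'r':
--             energy += rep
--         elif ch == 'w':
--             energy += wrk
--         elif ch == 's':
--             energy += slp
--
--     return energy
-- ===== SOURCE B (Python) =====
-- def calculate_iter_energy(typ, rep, slp, wrk):
--     # count-then-combine: one count per relevant character, then one arithmetic expression
--     return typ.count('r') * rep + typ.count('w') * wrk + typ.count('s') * slp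
-- ===== Notes on version B (the rewrite author's own statement) =====
-- stated objective: idiomatic
-- what changed: Replaced the per-character if/elif accumulation loop by a count-then-combine structure: three str.count calls (C-level scans) multiplied by the respective costs and summed in one expression.
import Mathlib
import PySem

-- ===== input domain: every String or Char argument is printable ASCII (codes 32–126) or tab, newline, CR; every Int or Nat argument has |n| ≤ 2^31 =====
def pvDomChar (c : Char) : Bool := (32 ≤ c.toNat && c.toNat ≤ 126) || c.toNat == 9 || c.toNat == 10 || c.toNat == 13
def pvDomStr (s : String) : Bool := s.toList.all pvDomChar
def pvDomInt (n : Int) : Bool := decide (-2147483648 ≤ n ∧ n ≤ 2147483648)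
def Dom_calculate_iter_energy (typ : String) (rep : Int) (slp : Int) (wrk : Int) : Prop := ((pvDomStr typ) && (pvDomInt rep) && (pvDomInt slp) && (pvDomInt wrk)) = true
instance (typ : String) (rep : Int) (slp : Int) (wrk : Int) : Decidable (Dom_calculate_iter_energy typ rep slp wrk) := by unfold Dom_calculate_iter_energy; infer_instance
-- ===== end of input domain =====

-- B replaces the per-character if/elif loop by count-then-combine (three str.count calls, one expression); objective: idiomatic.


-- ===== PORT A =====
def calculate_iter_energy (typ : String) (rep : Int) (slp : Int) (wrk : Int) : Int :=
  typ.toList.foldl (fun energy ch =>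
    if ch == 'r' then energy + rep
    else if ch == 'w' then energy + wrk
    else if ch == 's' then energy + slp
    else energy) 0

-- ===== PORT B =====
def calculate_iter_energy_alt (typ : String) (rep : Int) (slp : Int) (wrk : Int) : Int :=
  (PySem.Str.count typ "r" : Int) * rep + (PySem.Str.count typ "w" : Int) * wrk
    + (PySem.Str.count typ "s" : Int) * slp

-- ===== PRECONDITION & SPEC =====
def Spec_calculate_iter_energy (typ : String) (rep : Int) (slp : Int) (wrk : Int) (out : Int) : Prop := out = calculate_iter_energy_alt typ rep slp wrk
instance (typ : String) (rep : Int) (slp : Int) (wrk : Int) (out : Int) : Decidable (Spec_calculate_iter_energy typ rep slp wrk out) := by unfold Spec_calculate_iter_energy; infer_instance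

-- ===== CLAIM (what is proved, stated in full; the proofs are below) =====
def Claim_equal_calculate_iter_energy : Prop := ∀ (typ : String) (rep : Int) (slp : Int) (wrk : Int), Dom_calculate_iter_energy typ rep slp wrk → Spec_calculate_iter_energy typ rep slp wrk (calculate_iter_energy typ rep slp wrk)

-- ===== LEMMAS AND PROOFS =====

-- str.count with a single-character needle is the character count
theorem count_go_singleton (c : Char) (s : List Char) (fuel acc : Nat) (h : s.length ≤ fuel) :
    PySem.Chars.count.go [c] fuel s acc = acc + s.count c := by
  induction s generalizing fuel acc with
  | nil => cases fuel <;> simp [PySem.Chars.count.go]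
  | cons x t ih =>
    cases fuel with
    | zero => simp at h
    | succ f =>
      simp only [PySem.Chars.count.go]
      by_cases hx : x = c
      · subst hx
        simp [List.isPrefixOf, ih _ _ (by simpa using h)]
        omega
      · simp [List.isPrefixOf, hx, Ne.symm hx, ih _ _ (by simpa using h)]

theorem chars_count_singleton (s : List Char) (c : Char) :
    PySem.Chars.count s [c] = s.count c := by
  simp [PySem.Chars.count, count_go_singleton c s s.length 0 le_rfl]

-- A's accumulation loop computes the count-weighted sum
theorem foldA_eq (l : List Char) (rep slp wrk a : Int) :
    l.foldl (fun energy ch =>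
      if ch == 'r' then energy + rep
      else if ch == 'w' then energy + wrk
      else if ch == 's' then energy + slp
      else energy) a
    = a + (l.count 'r' : Int) * rep + (l.count 'w' : Int) * wrk + (l.count 's' : Int) * slp := by
  induction l generalizing a with
  | nil => simp
  | cons x t ih =>
    simp only [List.foldl_cons, ih, List.count_cons]
    by_cases h1 : x = 'r' <;> by_cases h2 : x = 'w' <;> by_cases h3 : x = 's' <;>
      simp_all <;> ring

-- ===== VERDICT (by name: the statement is the Claim_ definition above) =====
theorem calculate_iter_energy_spec : Claim_equal_calculate_iter_energy := by
  intro typ rep slp wrk _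
  unfold Spec_calculate_iter_energy calculate_iter_energy calculate_iter_energy_alt
  rw [foldA_eq]
  simp [PySem.Str.count, chars_count_singleton]
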